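-- pv_equiv track=rewrite | github.com/lobotomoe/revenant | python/scripts/prepare_font.py | _build_cid_widths_str
-- ===== SOURCE A (Python) =====
-- def _build_cid_widths_str(cmap: dict[int, int], widths: dict[int, int]) -> str:
--     """Build PDF /W array string for CIDFont.
--
--     Format: [first_gid [w1 w2 ...] ...] for consecutive glyph IDs.
--     """
--     # Collect used glyph IDs and their widths
--     used_gids = sorted(set(cmap.values()))
--     if not used_gids:
--         return "[]"
--
--     groups: list[str] = []
--     current_start = used_gids[0]
--     current_widths = [widths.get(used_gids[0], 600)]
--
--     for gid in used_gids[1:]: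
--         if gid == current_start + len(current_widths):
--             # Consecutive
--             current_widths.append(widths.get(gid, 600))
--         else:
--             # Gap — flush current group
--             w_str = " ".join(str(w) for w in current_widths)
--             groups.append(f"{current_start} [{w_str}]")
--             current_start = gid
--             current_widths = [widths.get(gid, 600)]
--
--     # Flush last group
--     w_str = " ".join(str(w) for w in current_widths)
--     groups.append(f"{current_start} [{w_str}]")
--
--     return "[" + " ".join(groups) + "]"
-- ===== SOURCE B (Python) =====
-- def _build_cid_widths_str(cmap: dict[int, int], widths: dict[int, int]) -> str:
--     """Build PDF /W array string for CIDFont (runs built back-to-front, then rendered)."""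
--     gids = sorted(set(cmap.values()))
--     runs: list[list[int]] = []
--     for g in reversed(gids):
--         if runs and runs[0][0] == g + 1:
--             runs[0] = [g] + runs[0]
--         else:
--             runs = [[g]] + runs
--     groups = [
--         f"{run[0]} [{' '.join(str(widths.get(g, 600)) for g in run)}]" for run in runs
--     ]
--     return "[" + " ".join(groups) + "]"
-- ===== Notes on version B (the rewrite author's own statement) =====
-- stated objective: alternative
-- what changed: B replaces A's left-to-right loop with explicit current-start/flush state by a right-to-left pass that builds the list of consecutive runs back-to-front (prepending or merging into the front run), followed by a separate render pass over the runs.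
import Mathlib
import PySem

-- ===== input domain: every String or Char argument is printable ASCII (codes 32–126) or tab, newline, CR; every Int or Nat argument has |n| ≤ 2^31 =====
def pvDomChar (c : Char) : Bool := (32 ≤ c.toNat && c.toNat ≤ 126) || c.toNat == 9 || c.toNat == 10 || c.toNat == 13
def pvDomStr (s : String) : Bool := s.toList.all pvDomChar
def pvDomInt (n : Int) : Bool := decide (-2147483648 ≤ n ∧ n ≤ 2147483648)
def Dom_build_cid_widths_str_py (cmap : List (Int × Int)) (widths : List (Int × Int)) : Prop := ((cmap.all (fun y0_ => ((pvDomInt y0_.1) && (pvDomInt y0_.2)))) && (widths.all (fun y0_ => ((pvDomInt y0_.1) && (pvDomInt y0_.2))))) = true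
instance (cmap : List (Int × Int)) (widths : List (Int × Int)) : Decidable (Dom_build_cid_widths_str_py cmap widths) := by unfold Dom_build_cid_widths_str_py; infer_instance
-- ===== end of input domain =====

-- B builds the run list back-to-front with a right fold and renders it in a second pass,
-- instead of A's left-to-right flush-state loop; alternative decomposition, same result.

-- shared helper: the f-string "{start} [{w1 w2 ...}]" (identical in both Pythons)
def pvFmtGroup (s : Int) (ws : List Int) : String :=
  PySem.Int.toStr s ++ " [" ++ PySem.Str.join " " (ws.map PySem.Int.toStr) ++ "]"

-- ===== PORT A =====
-- loop body of A's for-loop (flush-state step)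
def pvStepA (wf : Int → Int) (st : List String × Int × List Int) (gid : Int) :
    List String × Int × List Int :=
  match st with
  | (groups, cs, cw) =>
    if gid = cs + (cw.length : Int) then (groups, cs, cw ++ [wf gid])
    else (groups ++ [pvFmtGroup cs cw], gid, [wf gid])

def build_cid_widths_str_py (cmap : List (Int × Int)) (widths : List (Int × Int)) : String :=
  let used_gids := PySem.List.sorted (PySem.Set.ofList (PySem.Dict.ofList cmap).values) (fun x => x) false
  match used_gids with
  | [] => "[]"
  | g0 :: rest =>
    let wf := fun g => (PySem.Dict.ofList widths).getD g 600
    let st := rest.foldl (pvStepA wf) ([], g0, [wf g0])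
    "[" ++ PySem.Str.join " " (st.1 ++ [pvFmtGroup st.2.1 st.2.2]) ++ "]"

-- ===== PORT B =====
-- B's reversed-order loop with prepends = a right fold building the list of runs
-- B's reversed loop body: prepend g to the front run if consecutive, else open a new front run
def pvStepB (g : Int) (runs : List (List Int)) : List (List Int) :=
  match runs with
  | (h :: t) :: rs => if h = g + 1 then (g :: h :: t) :: rs else [g] :: (h :: t) :: rs
  | rs => [g] :: rs

def pvRunsB (gids : List Int) : List (List Int) :=
  gids.foldr pvStepB []

def build_cid_widths_str_py_alt (cmap : List (Int × Int)) (widths : List (Int × Int)) : String :=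
  let gids := PySem.List.sorted (PySem.Set.ofList (PySem.Dict.ofList cmap).values) (fun x => x) false
  let wf := fun g => (PySem.Dict.ofList widths).getD g 600
  -- run[0]: runs produced by pvRunsB are never empty, so headD's default is never used
  let groups := (pvRunsB gids).map (fun run => pvFmtGroup (run.headD 0) (run.map wf))
  "[" ++ PySem.Str.join " " groups ++ "]"

-- ===== PRECONDITION & SPEC =====
def Spec_build_cid_widths_str_py (cmap : List (Int × Int)) (widths : List (Int × Int)) (out : String) : Prop := out = build_cid_widths_str_py_alt cmap widths
instance (cmap : List (Int × Int)) (widths : List (Int × Int)) (out : String) : Decidable (Spec_build_cid_widths_str_py cmap widths out) := by unfold Spec_build_cid_widths_str_py; infer_instance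

-- ===== CLAIM (what is proved, stated in full; the proofs are below) =====
def Claim_equal_build_cid_widths_str_py : Prop := ∀ (cmap : List (Int × Int)) (widths : List (Int × Int)), Dom_build_cid_widths_str_py cmap widths → Spec_build_cid_widths_str_py cmap widths (build_cid_widths_str_py cmap widths)

-- ===== LEMMAS AND PROOFS =====

-- proof-side: render a list of runs the way B does
def pvRender (wf : Int → Int) (rs : List (List Int)) : List String :=
  rs.map (fun run => pvFmtGroup (run.headD 0) (run.map wf))

-- proof-side: what A's loop (plus final flush) produces from state (s, ws) and remaining gids
def pvRunsRender (wf : Int → Int) (s : Int) (ws : List Int) : List Int → List String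
  | [] => [pvFmtGroup s ws]
  | g :: rest =>
    if g = s + (ws.length : Int) then pvRunsRender wf s (ws ++ [wf g]) rest
    else pvFmtGroup s ws :: pvRunsRender wf g [wf g] rest

-- proof-side: pvRunsRender expressed against the runs of the remaining gids
def pvGlue (wf : Int → Int) (s : Int) (ws : List Int) (rs : List (List Int)) : List String :=
  match rs with
  | (h :: t) :: rs' =>
    if h = s + (ws.length : Int) then pvFmtGroup s (ws ++ (h :: t).map wf) :: pvRender wf rs'
    else pvFmtGroup s ws :: pvRender wf ((h :: t) :: rs')
  | _ => [pvFmtGroup s ws]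

theorem pvRunsB_head_ne_nil (gs : List Int) (r : List Int) (rs : List (List Int))
    (h : pvRunsB gs = r :: rs) : r ≠ [] := by
  cases gs with
  | nil => simp [pvRunsB] at h
  | cons g gs' =>
    have hB : pvRunsB (g :: gs') = pvStepB g (pvRunsB gs') := by simp [pvRunsB]
    rw [hB] at h
    rcases hr : pvRunsB gs' with _ | ⟨_ | ⟨a, t⟩, rest⟩ <;> rw [hr] at h <;>
      simp only [pvStepB] at h
    · injection h with h1 _; subst h1; simp
    · injection h with h1 _; subst h1; simp
    · split_ifs at h <;> (injection h with h1 _; subst h1; simp)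

theorem pvLoopA (wf : Int → Int) (rest : List Int) :
    ∀ (groups : List String) (s : Int) (ws : List Int),
    (let st := rest.foldl (pvStepA wf) (groups, s, ws)
     st.1 ++ [pvFmtGroup st.2.1 st.2.2]) = groups ++ pvRunsRender wf s ws rest := by
  induction rest with
  | nil => intro groups s ws; simp [pvRunsRender]
  | cons g rest' ih =>
    intro groups s ws
    simp only [List.foldl_cons, pvStepA, pvRunsRender]
    split_ifs with hc
    · exact ih groups s (ws ++ [wf g])
    · rw [ih (groups ++ [pvFmtGroup s ws]) g [wf g]]
      simp

theorem pvRunsRender_eq_glue (wf : Int → Int) (rest : List Int) :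
    ∀ (s : Int) (ws : List Int),
    pvRunsRender wf s ws rest = pvGlue wf s ws (pvRunsB rest) := by
  induction rest with
  | nil => intro s ws; simp [pvRunsRender, pvRunsB, pvGlue]
  | cons g rest' ih =>
    intro s ws
    have hB : pvRunsB (g :: rest') = pvStepB g (pvRunsB rest') := by simp [pvRunsB]
    rw [hB]
    simp only [pvRunsRender, ih]
    rcases hr : pvRunsB rest' with _ | ⟨_ | ⟨h, t⟩, rs⟩
    · simp only [pvStepB, pvGlue, pvRender, List.map_cons, List.map_nil]
      split_ifs <;> simp
    · exact absurd rfl (pvRunsB_head_ne_nil rest' [] rs hr)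
    · simp only [pvStepB, pvGlue, pvRender, List.map_cons,
        List.length_append, List.length_cons, List.length_nil]
      push_cast
      split_ifs <;> first
        | omega
        | simp_all [List.append_assoc]

theorem pvTop (wf : Int → Int) (g : Int) (rest : List Int) :
    pvRunsRender wf g [wf g] rest = pvRender wf (pvRunsB (g :: rest)) := by
  rw [pvRunsRender_eq_glue]
  have hB : pvRunsB (g :: rest) = pvStepB g (pvRunsB rest) := by simp [pvRunsB]
  rw [hB]
  rcases hr : pvRunsB rest with _ | ⟨_ | ⟨h, t⟩, rs⟩
  · simp [pvStepB, pvGlue, pvRender]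
  · exact absurd rfl (pvRunsB_head_ne_nil rest [] rs hr)
  · simp only [pvStepB, pvGlue, pvRender, List.map_cons, List.length_cons,
      List.length_nil]
    push_cast
    split_ifs <;> first
      | omega
      | simp_all [List.append_assoc]

-- ===== VERDICT (by name: the statement is the Claim_ definition above) =====
theorem build_cid_widths_str_py_spec : Claim_equal_build_cid_widths_str_py := by
  intro cmap widths _
  unfold Spec_build_cid_widths_str_py build_cid_widths_str_py build_cid_widths_str_py_alt
  cases hg : PySem.List.sorted (PySem.Set.ofList (PySem.Dict.ofList cmap).values) (fun x => x) false with
  | nil => simp only [pvRunsB, List.foldr_nil, List.map_nil]; decide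
  | cons g0 rest =>
    simp only []
    rw [pvLoopA, pvTop]
    simp [pvRender]
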